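-- pv_equiv track=rewrite | github.com/pypi-data/pypi-mirror-316 | packages/axonemalyze/axonemalyze-0.0.1.tar.gz/axonemalyze-0.0.1/axonemalyze/segment_axonemes.py | build_strict_mutual_network
-- ===== SOURCE A (Python) =====
-- def build_strict_mutual_network(adjacency_list):
--     """
--     Build a network with a stricter criterion: only recognize a contact if the
--     nearest neighbors are mutual (both nodes have each other as neighbors).
--     """
--     strict_adj_list = {}
--
--     for node, neighbors in adjacency_list.items():
--         strict_adj_list[node] = set()
--         for neighbor in neighbors:
--             if node in adjacency_list.get(neighbor, []):
--                 strict_adj_list[node].add(neighbor)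
--                 if neighbor not in strict_adj_list:
--                     strict_adj_list[neighbor] = set()
--                 strict_adj_list[neighbor].add(node)
--
--     def dfs(node, visited, cluster):
--         visited.add(node)
--         cluster.add(node)
--         for neighbor in strict_adj_list[node]:
--             if neighbor not in visited:
--                 dfs(neighbor, visited, cluster)
--
--     visited = set()
--     clusters = []
--
--     for node in strict_adj_list:
--         if node not in visited:
--             cluster = set()
--             dfs(node, visited, cluster)
--             clusters.append(cluster)
--
--     return clusters
-- ===== SOURCE B (Python) =====
-- def build_strict_mutual_network(adjacency_list):
--     """
--     Same result, rebuilt in staged passes: precompute each node's neighbor set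
--     once (O(1) mutual test), build the whole mutual-neighbor map in a single
--     comprehension pass (no symmetric re-insertion into a half-built dict), then
--     collect the connected components with an ITERATIVE explicit-stack traversal
--     instead of A's recursive DFS.
--     """
--     neighbor_sets = {u: set(vs) for u, vs in adjacency_list.items()}
--     mutual = {u: {v for v in vs if u in neighbor_sets.get(v, ())}
--               for u, vs in adjacency_list.items()}
--
--     visited = set()
--     clusters = []
--     for start in adjacency_list:
--         if start in visited:
--             continue
--         cluster = set()
--         stack = [start]
--         while stack:
--             v = stack.pop()
--             if v in visited:
--                 continue
--             visited.add(v)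
--             cluster.add(v)
--             stack.extend(reversed(list(mutual[v])))
--         clusters.append(cluster)
--     return clusters
-- ===== Notes on version B (the rewrite author's own statement) =====
-- stated objective: faster
-- what changed: B precomputes each node's neighbour set once so the mutual test is an O(1) set lookup, builds the whole mutual-neighbour map in one comprehension pass (A instead rescans the other node's neighbour list per edge and symmetrically re-inserts into a half-built dict), and collects components with an iterative explicit-stack traversal instead of A's recursive DFS.
import Mathlib
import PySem

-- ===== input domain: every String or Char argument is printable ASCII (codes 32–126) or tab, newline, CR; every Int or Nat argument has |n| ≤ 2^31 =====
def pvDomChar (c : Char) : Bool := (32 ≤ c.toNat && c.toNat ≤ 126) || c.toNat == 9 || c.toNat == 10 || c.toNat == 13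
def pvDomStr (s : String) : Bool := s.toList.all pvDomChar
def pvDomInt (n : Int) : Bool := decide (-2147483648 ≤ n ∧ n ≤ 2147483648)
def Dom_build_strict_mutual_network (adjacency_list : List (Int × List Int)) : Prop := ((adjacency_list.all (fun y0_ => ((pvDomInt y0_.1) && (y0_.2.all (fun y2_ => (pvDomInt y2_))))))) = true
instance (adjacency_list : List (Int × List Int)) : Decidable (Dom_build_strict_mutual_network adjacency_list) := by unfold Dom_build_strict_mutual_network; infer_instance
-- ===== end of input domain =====

-- B precomputes neighbour sets for an O(1) mutual test, builds the mutual map in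
-- one comprehension pass, and finds components with an iterative explicit-stack
-- traversal (A rescans neighbour lists per edge and uses a recursive DFS);
-- return values are proved identical.

-- ===== PORT A =====
-- dfs of port A (fuel is only a totality guard; the call below passes a provably
-- sufficient bound, Python's recursion needs none)
mutual
def dfsA (strict : PySem.Dict Int (PySem.Set Int)) : Nat → Int → PySem.Set Int → PySem.Set Int → PySem.Set Int × PySem.Set Int
  | 0, _, vis, cl => (vis, cl)
  | f+1, u, vis, cl =>
      -- Python: visited.add(node); cluster.add(node); for neighbor in strict_adj_list[node]: ...
      dfsLoopA strict f (strict.getD u PySem.Set.empty) (PySem.Set.add vis u) (PySem.Set.add cl u)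
termination_by f _ _ _ => (f, 0)
def dfsLoopA (strict : PySem.Dict Int (PySem.Set Int)) : Nat → List Int → PySem.Set Int → PySem.Set Int → PySem.Set Int × PySem.Set Int
  | _, [], vis, cl => (vis, cl)
  | f, w :: ws, vis, cl =>
      if PySem.Set.contains vis w then dfsLoopA strict f ws vis cl
      else
        let r := dfsA strict f w vis cl
        dfsLoopA strict f ws r.1 r.2
termination_by f l _ _ => (f, l.length + 1)
end

def build_strict_mutual_network (adjacency_list : List (Int × List Int)) : List (List Int) :=
  let d := PySem.Dict.ofList adjacency_list
  let strict := d.items.foldl (fun (s : PySem.Dict Int (PySem.Set Int)) p =>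
      let s := s.insert p.1 PySem.Set.empty
      p.2.foldl (fun (s : PySem.Dict Int (PySem.Set Int)) v =>
          if p.1 ∈ d.getD v [] then
            let s := s.modify p.1 PySem.Set.empty (fun st => PySem.Set.add st v)
            let s := if s.contains v then s else s.insert v PySem.Set.empty
            s.modify v PySem.Set.empty (fun st => PySem.Set.add st p.1)
          else s) s) PySem.Dict.empty
  (strict.keys.foldl (fun (acc : PySem.Set Int × List (List Int)) u =>
      if PySem.Set.contains acc.1 u then acc
      else
        let r := dfsA strict (strict.size + 1) u acc.1 PySem.Set.empty
        (r.1, acc.2 ++ [r.2])) (PySem.Set.empty, [])).2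


-- ===== PORT B ===== (B: neighbour sets precomputed once; mutual map built in one
-- comprehension pass; iterative explicit-stack traversal over the input's keys.
-- The Python stack pops from the END; the Lean list below is kept TOP-FIRST, so
-- 'stack.extend(reversed(list(mutual[v])))' becomes 'mutual[v] ++ rest'.
-- Fuel decreases only on the visit branch and is only a totality guard; the call
-- below passes a provably sufficient bound, Python's while-loop needs none.)
def stackRun (mdict : PySem.Dict Int (PySem.Set Int)) : Nat → List Int → PySem.Set Int → PySem.Set Int → PySem.Set Int × PySem.Set Int
  | _, [], vis, cl => (vis, cl)
  | 0, v :: rest, vis, cl =>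
      if PySem.Set.contains vis v then stackRun mdict 0 rest vis cl
      else (vis, cl)
  | f+1, v :: rest, vis, cl =>
      if PySem.Set.contains vis v then stackRun mdict (f+1) rest vis cl
      else stackRun mdict f ((mdict.getD v PySem.Set.empty : List Int) ++ rest) (PySem.Set.add vis v) (PySem.Set.add cl v)
termination_by f ws _ _ => (f, ws.length)

def build_strict_mutual_network_alt (adjacency_list : List (Int × List Int)) : List (List Int) :=
  let d := PySem.Dict.ofList adjacency_list
  let nsets := d.items.foldl (fun (m : PySem.Dict Int (PySem.Set Int)) p =>
      m.insert p.1 (PySem.Set.ofList p.2)) PySem.Dict.empty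
  let mdict := d.items.foldl (fun (m : PySem.Dict Int (PySem.Set Int)) p =>
      m.insert p.1 (PySem.Set.ofList (p.2.filter (fun v =>
        PySem.Set.contains (nsets.getD v PySem.Set.empty) p.1)))) PySem.Dict.empty
  (d.keys.foldl (fun (acc : PySem.Set Int × List (List Int)) u =>
      if PySem.Set.contains acc.1 u then acc
      else
        let r := stackRun mdict (mdict.size + 1) [u] acc.1 PySem.Set.empty
        (r.1, acc.2 ++ [r.2])) (PySem.Set.empty, [])).2


-- ===== PRECONDITION & SPEC =====
def Spec_build_strict_mutual_network (adjacency_list : List (Int × List Int)) (out : List (List Int)) : Prop := out = build_strict_mutual_network_alt adjacency_list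
instance (adjacency_list : List (Int × List Int)) (out : List (List Int)) : Decidable (Spec_build_strict_mutual_network adjacency_list out) := by unfold Spec_build_strict_mutual_network; infer_instance

-- ===== CLAIM (what is proved, stated in full; the proofs are below) =====
def Claim_equal_build_strict_mutual_network : Prop := ∀ (adjacency_list : List (Int × List Int)), Dom_build_strict_mutual_network adjacency_list → Spec_build_strict_mutual_network adjacency_list (build_strict_mutual_network adjacency_list)

-- ===== LEMMAS AND PROOFS =====

-- neighbour list: the mutual neighbours of u, in adjacency order
def nbrL (d : PySem.Dict Int (List Int)) (u : Int) : List Int :=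
  (d.getD u []).filter (fun v => decide (u ∈ d.getD v []))

def nbrS (d : PySem.Dict Int (List Int)) (u : Int) : PySem.Set Int :=
  PySem.Set.ofList (nbrL d u)

theorem set_contains_ofList (xs : List Int) (u : Int) :
    PySem.Set.contains (PySem.Set.ofList xs) u = decide (u ∈ xs) := by
  by_cases h : u ∈ xs <;>
    simp [PySem.Set.contains_eq_listContains, PySem.Set.mem_ofList, h]

theorem foldl_insert_getD {β : Type} (g : (Int × List Int) → β) (dflt : β) :
    ∀ (l : List (Int × List Int)) (m0 : PySem.Dict Int β) (v : Int),
    (l.foldl (fun m p => m.insert p.1 (g p)) m0).getD v dflt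
      = (l.filter (fun p => p.1 == v)).foldl (fun _ p => g p) (m0.getD v dflt) := by
  intro l
  induction l with
  | nil => intro m0 v; rfl
  | cons p l ih =>
    intro m0 v
    simp only [List.foldl_cons, List.filter_cons]
    by_cases h : p.1 = v
    · simp only [h, beq_self_eq_true, if_pos, List.foldl_cons]
      rw [ih]
      congr 1
      subst h; rw [PySem.Dict.getD_insert_self]
    · have hb : (p.1 == v) = false := by simp [h]
      simp only [hb, Bool.false_eq_true, if_false]
      rw [ih]
      congr 1
      rw [PySem.Dict.getD_insert, if_neg (fun hh => h hh.symm)]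

theorem keys_filter_eq (v : Int) :
    ∀ (ks : List Int), ks.Nodup →
      ks.filter (fun k => k == v) = if v ∈ ks then [v] else [] := by
  intro ks
  induction ks with
  | nil => intro _; simp
  | cons k ks ih =>
    intro hnd
    rcases List.nodup_cons.mp hnd with ⟨hk, hnd'⟩
    by_cases h : k = v
    · subst h
      simp only [List.filter_cons, beq_self_eq_true, if_pos, List.mem_cons, true_or]
      rw [ih hnd', if_neg hk]
    · have hb : (k == v) = false := by simp [h]
      simp only [List.filter_cons, hb, Bool.false_eq_true, if_false, List.mem_cons]
      rw [ih hnd']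
      by_cases hv : v ∈ ks
      · simp [hv]
      · simp [hv, Ne.symm h]

theorem items_filter_key (d : PySem.Dict Int (List Int)) (hnd : d.keys.Nodup) (v : Int) :
    d.items.filter (fun p => p.1 == v)
      = if v ∈ d.keys then [(v, d.getD v [])] else [] := by
  rw [PySem.Dict.items_eq_map_keys d hnd []]
  rw [List.filter_map]
  have : ((fun (p : Int × List Int) => p.1 == v) ∘ (fun k => (k, d.getD k []))) = (fun k => k == v) := rfl
  rw [this, keys_filter_eq v d.keys hnd]
  by_cases hv : v ∈ d.keys <;> simp [hv]

-- B's neighbour-set dict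
def nsetsOf (d : PySem.Dict Int (List Int)) : PySem.Dict Int (PySem.Set Int) :=
  d.items.foldl (fun m p => m.insert p.1 (PySem.Set.ofList p.2)) PySem.Dict.empty

def mutOf (d : PySem.Dict Int (List Int)) : PySem.Dict Int (PySem.Set Int) :=
  d.items.foldl (fun m p =>
      m.insert p.1 (PySem.Set.ofList (p.2.filter (fun v =>
        PySem.Set.contains ((nsetsOf d).getD v PySem.Set.empty) p.1)))) PySem.Dict.empty

theorem getD_eq_nil_of_not_mem_keys (d : PySem.Dict Int (List Int)) (v : Int) (h : v ∉ d.keys) :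
    d.getD v [] = [] := by
  apply PySem.Dict.getD_of_not_contains
  rw [PySem.Dict.contains_eq_decide_mem_keys]
  simp [h]

theorem nsetsOf_getD (d : PySem.Dict Int (List Int)) (hnd : d.keys.Nodup) (v : Int) :
    (nsetsOf d).getD v PySem.Set.empty = PySem.Set.ofList (d.getD v []) := by
  unfold nsetsOf
  rw [foldl_insert_getD]
  rw [items_filter_key d hnd v]
  by_cases hv : v ∈ d.keys
  · simp [hv]
  · simp [hv, PySem.Dict.getD_empty, getD_eq_nil_of_not_mem_keys d v hv]

theorem mutOf_getD (d : PySem.Dict Int (List Int)) (hnd : d.keys.Nodup) (u : Int) :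
    (mutOf d).getD u PySem.Set.empty = nbrS d u := by
  unfold mutOf
  rw [foldl_insert_getD]
  rw [items_filter_key d hnd u]
  by_cases hv : u ∈ d.keys
  · simp only [hv, if_true, List.foldl_cons, List.foldl_nil]
    unfold nbrS nbrL
    congr 1
    apply List.filter_congr
    intro v _
    rw [nsetsOf_getD d hnd v, set_contains_ofList]
  · simp only [hv, if_false, List.foldl_nil, PySem.Dict.getD_empty]
    unfold nbrS nbrL
    rw [getD_eq_nil_of_not_mem_keys d u hv]
    rfl

-- ========== phase 1 of A: characterization ==========

def strictOf (d : PySem.Dict Int (List Int)) : PySem.Dict Int (PySem.Set Int) :=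
  d.items.foldl (fun s p =>
      let s := s.insert p.1 PySem.Set.empty
      p.2.foldl (fun (s : PySem.Dict Int (PySem.Set Int)) v =>
          if p.1 ∈ d.getD v [] then
            let s := s.modify p.1 PySem.Set.empty (fun st => PySem.Set.add st v)
            let s := if s.contains v then s else s.insert v PySem.Set.empty
            s.modify v PySem.Set.empty (fun st => PySem.Set.add st p.1)
          else s) s) PySem.Dict.empty

def blocksK (d : PySem.Dict Int (List Int)) (pk : List Int) : List Int :=
  (pk.map (fun w => w :: nbrL d w)).flatten

def oldVal (d : PySem.Dict Int (List Int)) (pk : List Int) (v : Int) : PySem.Set Int :=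
  if v ∈ pk then nbrS d v
  else PySem.Set.ofList (pk.filter (fun w => decide (v ∈ nbrL d w)))

def J (d : PySem.Dict Int (List Int)) (pk : List Int) (u : Int) (done : List Int)
    (s : PySem.Dict Int (PySem.Set Int)) : Prop :=
  s.keys = PySem.Set.ofList (blocksK d pk ++ u :: done.filter (fun v => decide (u ∈ d.getD v [])))
  ∧ s.getD u PySem.Set.empty = PySem.Set.ofList (done.filter (fun v => decide (u ∈ d.getD v [])))
  ∧ ∀ v, v ≠ u → s.getD v PySem.Set.empty =
      (if v ∈ done.filter (fun v => decide (u ∈ d.getD v [])) then (oldVal d pk v).add u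
       else oldVal d pk v)

theorem nbrL_symm (d : PySem.Dict Int (List Int)) (u v : Int) :
    v ∈ nbrL d u ↔ u ∈ nbrL d v := by
  unfold nbrL
  simp only [List.mem_filter, decide_eq_true_eq]
  tauto

theorem nbrL_sub_getD (d : PySem.Dict Int (List Int)) (u v : Int) (h : v ∈ nbrL d u) :
    v ∈ d.getD u [] := by
  unfold nbrL at h
  exact (List.mem_filter.mp h).1

theorem inner_inv (d : PySem.Dict Int (List Int)) (u : Int) (pk : List Int)
    (hu_pk : u ∉ pk) :
    ∀ (todo done : List Int) (s : PySem.Dict Int (PySem.Set Int)),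
      J d pk u done s →
      J d pk u (done ++ todo)
        (todo.foldl (fun (s : PySem.Dict Int (PySem.Set Int)) v =>
          if u ∈ d.getD v [] then
            let s := s.modify u PySem.Set.empty (fun st => PySem.Set.add st v)
            let s := if s.contains v then s else s.insert v PySem.Set.empty
            s.modify v PySem.Set.empty (fun st => PySem.Set.add st u)
          else s) s) := by
  intro todo
  induction todo with
  | nil => intro done s hJ; simpa using hJ
  | cons v todo ih =>
    intro done s hJ
    obtain ⟨hK, hU, hV⟩ := hJ
    simp only [List.foldl_cons]
    have hrepl : done ++ v :: todo = (done ++ [v]) ++ todo := by simp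
    rw [hrepl]
    by_cases hc : u ∈ d.getD v []
    · -- the mutual branch
      simp only [if_pos hc]
      -- u is a key of s
      have huk : u ∈ s.keys := by
        rw [hK, PySem.Set.mem_ofList]
        simp
      have hcu : s.contains u = true := by
        rw [PySem.Dict.contains_eq_decide_mem_keys]; simpa using huk
      set t1 := s.modify u PySem.Set.empty (fun st => PySem.Set.add st v) with ht1
      have ht1keys : t1.keys = s.keys := by
        rw [ht1, PySem.Dict.keys_modify, PySem.Dict.keys_insert_of_contains _ _ hcu]
      have ht1getD : ∀ x, t1.getD x PySem.Set.empty =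
          if x = u then (s.getD u PySem.Set.empty).add v else s.getD x PySem.Set.empty := by
        intro x; rw [ht1, PySem.Dict.getD_modify]
      set t2 := if t1.contains v then t1 else t1.insert v PySem.Set.empty with ht2
      have ht2keys : t2.keys = if v ∈ s.keys then s.keys else s.keys ++ [v] := by
        rw [ht2]
        by_cases hvk : v ∈ s.keys
        · have : t1.contains v = true := by
            rw [PySem.Dict.contains_eq_decide_mem_keys]; rw [ht1keys]; simpa using hvk
          rw [if_pos this, ht1keys, if_pos hvk]
        · have : t1.contains v = false := by
            rw [PySem.Dict.contains_eq_decide_mem_keys]; rw [ht1keys]; simpa using hvk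
          rw [if_neg (by simp [this]), if_neg hvk,
            PySem.Dict.keys_insert_of_not_contains _ _ this, ht1keys]
      have ht2getD : ∀ x, t2.getD x PySem.Set.empty =
          if x = v ∧ v ∉ s.keys then PySem.Set.empty else t1.getD x PySem.Set.empty := by
        intro x
        rw [ht2]
        by_cases hvk : v ∈ s.keys
        · have : t1.contains v = true := by
            rw [PySem.Dict.contains_eq_decide_mem_keys]; rw [ht1keys]; simpa using hvk
          rw [if_pos this, if_neg (by tauto)]
        · have : t1.contains v = false := by
            rw [PySem.Dict.contains_eq_decide_mem_keys]; rw [ht1keys]; simpa using hvk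
          rw [if_neg (by simp [this]), PySem.Dict.getD_insert]
          by_cases hx : x = v
          · rw [if_pos hx, if_pos ⟨hx, hvk⟩]
          · rw [if_neg hx, if_neg (by tauto)]
      set t3 := t2.modify v PySem.Set.empty (fun st => PySem.Set.add st u) with ht3
      have hvk2 : v ∈ t2.keys := by
        rw [ht2keys]; by_cases hvk : v ∈ s.keys <;> simp [hvk]
      have hcv2 : t2.contains v = true := by
        rw [PySem.Dict.contains_eq_decide_mem_keys]; simpa using hvk2
      have ht3keys : t3.keys = t2.keys := by
        rw [ht3, PySem.Dict.keys_modify, PySem.Dict.keys_insert_of_contains _ _ hcv2]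
      have ht3getD : ∀ x, t3.getD x PySem.Set.empty =
          if x = v then (t2.getD v PySem.Set.empty).add u else t2.getD x PySem.Set.empty := by
        intro x; rw [ht3, PySem.Dict.getD_modify]
      -- establish J for done ++ [v]
      have hfilt : (done ++ [v]).filter (fun v => decide (u ∈ d.getD v []))
          = done.filter (fun v => decide (u ∈ d.getD v [])) ++ [v] := by
        rw [List.filter_append]
        simp [hc]
      apply ih
      refine ⟨?_, ?_, ?_⟩
      · -- keys
        rw [ht3keys, ht2keys, hK, hfilt]
        have hassoc : blocksK d pk ++ u :: (done.filter (fun v => decide (u ∈ d.getD v [])) ++ [v])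
            = (blocksK d pk ++ u :: done.filter (fun v => decide (u ∈ d.getD v []))) ++ [v] := by
          simp
        rw [hassoc, PySem.Set.ofList_append_singleton, PySem.Set.add_eq_ite]
      · -- value at u
        rw [ht3getD, hfilt]
        by_cases hvu : v = u
        · subst hvu
          rw [if_pos rfl]
          have hnotnew : ¬ (v = v ∧ v ∉ s.keys) := by
            intro ⟨_, hn⟩; exact hn huk
          rw [ht2getD, if_neg hnotnew, ht1getD, if_pos rfl, hU]
          rw [← PySem.Set.ofList_append_singleton]
          apply PySem.Set.add_of_mem
          rw [PySem.Set.mem_ofList]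
          simp
        · rw [if_neg (fun h => hvu h.symm)]
          have hnn : ¬ (u = v ∧ v ∉ s.keys) := fun h => hvu h.1.symm
          rw [ht2getD, if_neg hnn, ht1getD, if_pos rfl, hU, ← PySem.Set.ofList_append_singleton]
      · -- clause 3
        intro x hx
        rw [ht3getD, hfilt]
        by_cases hxv : x = v
        · subst hxv
          rw [if_pos rfl, if_pos (by simp)]
          by_cases hvk : x ∈ s.keys
          · have hnn : ¬ (x = x ∧ x ∉ s.keys) := by tauto
            rw [ht2getD, if_neg hnn, ht1getD, if_neg hx, hV x hx]
            by_cases hd : x ∈ done.filter (fun v => decide (u ∈ d.getD v []))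
            · rw [if_pos hd]
              exact PySem.Set.add_of_mem (by rw [PySem.Set.mem_add]; right; rfl)
            · rw [if_neg hd]
          · rw [ht2getD, if_pos ⟨rfl, hvk⟩]
            have hnb : x ∉ blocksK d pk := by
              have h1 : x ∉ PySem.Set.ofList (blocksK d pk ++ u ::
                  done.filter (fun v => decide (u ∈ d.getD v []))) := by
                rw [← hK]; exact hvk
              rw [PySem.Set.mem_ofList] at h1
              simp only [List.mem_append, List.mem_cons, not_or] at h1
              exact h1.1
            have hov : oldVal d pk x = PySem.Set.empty := by
              unfold oldVal
              have hxpk : x ∉ pk := by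
                intro hmem
                exact hnb (by
                  unfold blocksK
                  rw [List.mem_flatten]
                  exact ⟨x :: nbrL d x, List.mem_map.mpr ⟨x, hmem, rfl⟩, by simp⟩)
              rw [if_neg hxpk]
              have hfe : pk.filter (fun w => decide (x ∈ nbrL d w)) = [] := by
                rw [List.filter_eq_nil_iff]
                intro w hw hmemb
                apply hnb
                unfold blocksK
                rw [List.mem_flatten]
                refine ⟨w :: nbrL d w, List.mem_map.mpr ⟨w, hw, rfl⟩, ?_⟩
                simp only [decide_eq_true_eq] at hmemb
                exact List.mem_cons_of_mem _ hmemb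
              rw [hfe]
              rfl
            rw [hov]
        · rw [if_neg hxv]
          have hnn : ¬ (x = v ∧ v ∉ s.keys) := fun h => hxv h.1
          rw [ht2getD, if_neg hnn, ht1getD, if_neg hx, hV x hx]
          by_cases hd : x ∈ done.filter (fun v => decide (u ∈ d.getD v []))
          · rw [if_pos hd, if_pos (by simp [hd])]
          · rw [if_neg hd, if_neg (by simp [hxv, hd])]
    · -- not mutual: nothing happens
      simp only [if_neg hc]
      apply ih
      have hfilt : (done ++ [v]).filter (fun v => decide (u ∈ d.getD v []))
          = done.filter (fun v => decide (u ∈ d.getD v [])) := by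
        rw [List.filter_append]; simp [hc]
      rw [J, hfilt]
      exact ⟨hK, hU, hV⟩

def PInv (d : PySem.Dict Int (List Int)) (pk : List Int)
    (s : PySem.Dict Int (PySem.Set Int)) : Prop :=
  s.keys = PySem.Set.ofList (blocksK d pk)
  ∧ ∀ v, s.getD v PySem.Set.empty = oldVal d pk v

theorem phase1_inv (d : PySem.Dict Int (List Int)) :
    ∀ (l : List (Int × List Int)) (pk : List Int) (s : PySem.Dict Int (PySem.Set Int)),
      (∀ p ∈ l, d.getD p.1 [] = p.2) →
      (∀ p ∈ l, p.1 ∉ pk) →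
      (l.map Prod.fst).Nodup →
      PInv d pk s →
      PInv d (pk ++ l.map Prod.fst)
        (l.foldl (fun s p =>
          let s := s.insert p.1 PySem.Set.empty
          p.2.foldl (fun (s : PySem.Dict Int (PySem.Set Int)) v =>
              if p.1 ∈ d.getD v [] then
                let s := s.modify p.1 PySem.Set.empty (fun st => PySem.Set.add st v)
                let s := if s.contains v then s else s.insert v PySem.Set.empty
                s.modify v PySem.Set.empty (fun st => PySem.Set.add st p.1)
              else s) s) s) := by
  intro l
  induction l with
  | nil => intro pk s _ _ _ h; simpa using h
  | cons p l ih =>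
    rcases p with ⟨u, vs⟩
    intro pk s hval hpk hnd hInv
    obtain ⟨hK, hV⟩ := hInv
    have hu_pk : u ∉ pk := hpk (u, vs) (by simp)
    have hvs : d.getD u [] = vs := hval (u, vs) (by simp)
    simp only [List.foldl_cons]
    -- the state after inserting u ↦ ∅
    have hJ0 : J d pk u [] (s.insert u PySem.Set.empty) := by
      refine ⟨?_, ?_, ?_⟩
      · have : blocksK d pk ++ u :: List.filter (fun v => decide (u ∈ d.getD v [])) []
            = blocksK d pk ++ [u] := by simp
        rw [this, PySem.Set.ofList_append_singleton, PySem.Set.add_eq_ite, ← hK]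
        by_cases hc : u ∈ s.keys
        · rw [if_pos hc, PySem.Dict.keys_insert_of_contains _ _
            (by rw [PySem.Dict.contains_eq_decide_mem_keys]; simpa using hc)]
        · rw [if_neg hc, PySem.Dict.keys_insert_of_not_contains _ _
            (by rw [PySem.Dict.contains_eq_decide_mem_keys]; simpa using hc)]
      · rw [PySem.Dict.getD_insert, if_pos rfl]; rfl
      · intro v hv
        rw [PySem.Dict.getD_insert, if_neg hv, hV v]
        simp
    have hJ := inner_inv d u pk hu_pk vs [] (s.insert u PySem.Set.empty) hJ0
    obtain ⟨jK, jU, jV⟩ := hJ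
    simp only [List.nil_append] at jK jU jV
    have hfne : vs.filter (fun v => decide (u ∈ d.getD v [])) = nbrL d u := by
      unfold nbrL; rw [hvs]
    -- PInv for pk ++ [u]
    have hInv' : PInv d (pk ++ [u])
        (vs.foldl (fun (s : PySem.Dict Int (PySem.Set Int)) v =>
          if u ∈ d.getD v [] then
            let s := s.modify u PySem.Set.empty (fun st => PySem.Set.add st v)
            let s := if s.contains v then s else s.insert v PySem.Set.empty
            s.modify v PySem.Set.empty (fun st => PySem.Set.add st u)
          else s) (s.insert u PySem.Set.empty)) := by
      constructor
      · rw [jK, hfne]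
        unfold blocksK
        simp
      · intro v
        by_cases hvu : v = u
        · subst hvu
          rw [jU, hfne]
          unfold oldVal
          rw [if_pos (by simp)]
          rfl
        · rw [jV v hvu]
          simp only [hfne]
          unfold oldVal
          by_cases hvpk : v ∈ pk
          · have hmm : v ∈ pk ++ [u] := by simp [hvpk]
            by_cases hn : v ∈ nbrL d u
            · simp only [if_pos hvpk, if_pos hmm, if_pos hn]
              apply PySem.Set.add_of_mem
              unfold nbrS
              rw [PySem.Set.mem_ofList, ← nbrL_symm]
              exact hn
            · simp only [if_pos hvpk, if_pos hmm, if_neg hn]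
          · have hmm : v ∉ pk ++ [u] := by simp [hvpk, hvu]
            by_cases hn : v ∈ nbrL d u
            · simp only [if_neg hvpk, if_neg hmm, if_pos hn]
              rw [List.filter_append]
              have h1 : List.filter (fun w => decide (v ∈ nbrL d w)) [u] = [u] := by simp [hn]
              rw [h1, PySem.Set.ofList_append_singleton]
            · simp only [if_neg hvpk, if_neg hmm, if_neg hn]
              rw [List.filter_append]
              have h1 : List.filter (fun w => decide (v ∈ nbrL d w)) [u] = [] := by simp [hn]
              rw [h1, List.append_nil]
    have := ih (pk ++ [u])
      _ (fun q hq => hval q (by simp [hq]))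
      (fun q hq => by
        have h1 : q.1 ∉ pk := hpk q (by simp [hq])
        have h2 : q.1 ≠ u := by
          simp only [List.map_cons, List.nodup_cons] at hnd
          intro he
          exact hnd.1 (he ▸ List.mem_map_of_mem hq)
        simp [h1, h2])
      (by simp only [List.map_cons, List.nodup_cons] at hnd; exact hnd.2)
      hInv'
    simpa using this

-- ========== counting unvisited keys, closure ==========

def UV (d : PySem.Dict Int (List Int)) (vis : PySem.Set Int) : Nat :=
  d.keys.countP (fun x => decide (x ∉ vis))

def ClosedE (d : PySem.Dict Int (List Int)) (vis : PySem.Set Int) (T : List Int) : Prop :=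
  ∀ x ∈ vis, ∀ w ∈ nbrL d x, w ∈ vis ∨ w ∈ T

theorem nbrL_mem_keys (d : PySem.Dict Int (List Int)) (u v : Int) (h : v ∈ nbrL d u) :
    v ∈ d.keys := by
  unfold nbrL at h
  have h2 := (List.mem_filter.mp h).2
  simp only [decide_eq_true_eq] at h2
  by_contra hk
  rw [getD_eq_nil_of_not_mem_keys d v hk] at h2
  simp at h2

theorem countP_add_eq (vis : PySem.Set Int) (u : Int) (hv : u ∉ vis) :
    ∀ l : List Int, l.Nodup → u ∈ l →
      l.countP (fun x => decide (x ∉ vis.add u)) + 1 = l.countP (fun x => decide (x ∉ vis)) := by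
  intro l
  induction l with
  | nil => intro _ h; simp at h
  | cons a l ih =>
    intro hnd hm
    rcases List.nodup_cons.mp hnd with ⟨hal, hnd'⟩
    by_cases hau : a = u
    · subst hau
      have hcong : l.countP (fun x => decide (x ∉ vis.add a)) = l.countP (fun x => decide (x ∉ vis)) := by
        apply List.countP_congr
        intro x hx
        have hxa : x ≠ a := fun he => hal (he ▸ hx)
        simp [PySem.Set.mem_add, hxa]
      simp only [List.countP_cons]
      have h1 : (decide (a ∉ vis.add a)) = false := by simp [PySem.Set.mem_add]
      have h2 : (decide (a ∉ vis)) = true := by simpa using hv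
      rw [h1, h2, hcong]
      simp
    · have hm' : u ∈ l := by rcases List.mem_cons.mp hm with h | h; exact absurd h.symm hau; exact h
      have hhead : (decide (a ∉ vis.add u)) = (decide (a ∉ vis)) := by
        simp [PySem.Set.mem_add, hau]
      simp only [List.countP_cons, hhead]
      have := ih hnd' hm'
      omega

theorem UV_add (d : PySem.Dict Int (List Int)) (hnd : d.keys.Nodup) (vis : PySem.Set Int)
    (u : Int) (hu : u ∈ d.keys) (hv : u ∉ vis) :
    UV d (vis.add u) + 1 = UV d vis :=
  countP_add_eq vis u hv d.keys hnd hu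

theorem UV_mono (d : PySem.Dict Int (List Int)) (vis vis' : PySem.Set Int)
    (h : ∀ x ∈ vis, x ∈ vis') : UV d vis' ≤ UV d vis := by
  apply List.countP_mono_left
  intro x _ hx
  simp only [decide_eq_true_eq] at *
  intro hmem
  exact hx (h x hmem)

theorem UV_pos (d : PySem.Dict Int (List Int)) (vis : PySem.Set Int) (u : Int)
    (hu : u ∈ d.keys) (hv : u ∉ vis) : 0 < UV d vis := by
  unfold UV
  rw [List.countP_pos_iff]
  exact ⟨u, hu, by simpa using hv⟩

theorem UV_le_len (d : PySem.Dict Int (List Int)) (vis : PySem.Set Int) :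
    UV d vis ≤ d.keys.length :=
  List.countP_le_length

-- ========== monotonicity of the dfs visited set ==========

theorem dfs_mono (S : PySem.Dict Int (PySem.Set Int)) :
    ∀ f : Nat,
      (∀ u vis cl, ∀ x ∈ vis, x ∈ (dfsA S f u vis cl).1)
      ∧ (∀ ws vis cl, ∀ x ∈ vis, x ∈ (dfsLoopA S f ws vis cl).1) := by
  intro f
  induction f with
  | zero =>
    constructor
    · intro u vis cl x hx; simpa [dfsA] using hx
    · intro ws
      induction ws with
      | nil => intro vis cl x hx; simpa [dfsLoopA] using hx
      | cons w ws ih =>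
        intro vis cl x hx
        simp only [dfsLoopA]
        by_cases hc : PySem.Set.contains vis w
        · simp only [hc, if_true]; exact ih vis cl x hx
        · simp only [hc, Bool.false_eq_true, if_false, dfsA]
          exact ih vis cl x hx
  | succ f ihf =>
    have hd : ∀ u vis cl, ∀ x ∈ vis, x ∈ (dfsA S (f+1) u vis cl).1 := by
      intro u vis cl x hx
      simp only [dfsA]
      exact ihf.2 _ _ _ x (by rw [PySem.Set.mem_add]; exact Or.inl hx)
    refine ⟨hd, ?_⟩
    intro ws
    induction ws with
    | nil => intro vis cl x hx; simpa [dfsLoopA] using hx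
    | cons w ws ih =>
      intro vis cl x hx
      simp only [dfsLoopA]
      by_cases hc : PySem.Set.contains vis w
      · simp only [hc, if_true]; exact ih vis cl x hx
      · simp only [hc, Bool.false_eq_true, if_false]
        exact ih _ _ x (hd w vis cl x hx)

-- ========== dfs visits the neighbours of everything it visits ==========

theorem dfs_cl (d : PySem.Dict Int (List Int)) (hnd : d.keys.Nodup)
    (S : PySem.Dict Int (PySem.Set Int))
    (hS : ∀ x, S.getD x PySem.Set.empty = nbrS d x) :
    ∀ f : Nat,
      (∀ u vis cl T, u ∈ d.keys → u ∉ vis → UV d vis ≤ f → ClosedE d vis (u :: T) →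
        u ∈ (dfsA S f u vis cl).1
        ∧ ClosedE d (dfsA S f u vis cl).1 T
        ∧ (∀ x ∈ (dfsA S f u vis cl).1, x ∈ vis ∨ x ∈ d.keys))
      ∧ (∀ ws vis cl T, (∀ w ∈ ws, w ∈ d.keys) → UV d vis ≤ f → ClosedE d vis (ws ++ T) →
        (∀ w ∈ ws, w ∈ (dfsLoopA S f ws vis cl).1)
        ∧ ClosedE d (dfsLoopA S f ws vis cl).1 T
        ∧ (∀ x ∈ (dfsLoopA S f ws vis cl).1, x ∈ vis ∨ x ∈ d.keys)) := by
  intro f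
  induction f with
  | zero =>
    have hdfs0 : ∀ (u : Int) (vis cl : PySem.Set Int) (T : List Int), u ∈ d.keys → u ∉ vis → UV d vis ≤ 0 →
        ClosedE d vis (u :: T) → False := by
      intro u vis cl T hu hv huv _
      have := UV_pos d vis u hu hv
      omega
    constructor
    · intro u vis cl T hu hv huv hcl
      exact (hdfs0 u vis cl T hu hv huv hcl).elim
    · intro ws
      induction ws with
      | nil =>
        intro vis cl T _ _ hcl
        refine ⟨by simp, ?_, fun x hx => Or.inl (by simpa [dfsLoopA] using hx)⟩
        intro x hx w hw
        have := hcl x (by simpa [dfsLoopA] using hx) w hw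
        simpa [dfsLoopA] using this
      | cons w ws ih =>
        intro vis cl T hk huv hcl
        by_cases hc : w ∈ vis
        · have hcb : PySem.Set.contains vis w = true := (PySem.Set.contains_iff vis w).mpr hc
          simp only [dfsLoopA, hcb, if_true]
          have hcl' : ClosedE d vis (ws ++ T) := by
            intro x hx w' hw'
            rcases hcl x hx w' hw' with h | h
            · exact Or.inl h
            · have h3 : w' = w ∨ w' ∈ ws ∨ w' ∈ T := by simpa using h
              rcases h3 with h' | h' | h'
              · exact Or.inl (h' ▸ hc)
              · exact Or.inr (List.mem_append_left _ h')
              · exact Or.inr (List.mem_append_right _ h')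
          obtain ⟨hA, hB, hC⟩ := ih vis cl T (fun x hx => hk x (List.mem_cons_of_mem _ hx)) huv hcl'
          refine ⟨?_, hB, hC⟩
          intro w' hw'
          rcases List.mem_cons.mp hw' with h' | h'
          · subst h'
            exact (dfs_mono S 0).2 ws vis cl w' hc
          · exact hA w' h'
        · exact absurd huv (by
            have := UV_pos d vis w (hk w (by simp)) hc
            omega)
  | succ f ihf =>
    have hd : ∀ u vis cl T, u ∈ d.keys → u ∉ vis → UV d vis ≤ f + 1 → ClosedE d vis (u :: T) →
        u ∈ (dfsA S (f+1) u vis cl).1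
        ∧ ClosedE d (dfsA S (f+1) u vis cl).1 T
        ∧ (∀ x ∈ (dfsA S (f+1) u vis cl).1, x ∈ vis ∨ x ∈ d.keys) := by
      intro u vis cl T hu hv huv hcl
      simp only [dfsA, hS u]
      have hvadd : ∀ x, x ∈ PySem.Set.add vis u ↔ x ∈ vis ∨ x = u := by
        intro x; exact PySem.Set.mem_add vis u x
      have huv' : UV d (PySem.Set.add vis u) ≤ f := by
        have := UV_add d hnd vis u hu hv
        omega
      have hks : ∀ w ∈ (nbrS d u : List Int), w ∈ d.keys := by
        intro w hw
        exact nbrL_mem_keys d u w ((PySem.Set.mem_ofList _ _).mp hw)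
      have hcl' : ClosedE d (PySem.Set.add vis u) ((nbrS d u : List Int) ++ T) := by
        intro x hx w hw
        rcases (hvadd x).mp hx with hxv | hxu
        · rcases hcl x hxv w hw with h | h
          · exact Or.inl ((hvadd w).mpr (Or.inl h))
          · rcases List.mem_cons.mp h with h' | h'
            · exact Or.inl ((hvadd w).mpr (Or.inr h'))
            · exact Or.inr (List.mem_append_right _ h')
        · subst hxu
          exact Or.inr (List.mem_append_left _ ((PySem.Set.mem_ofList _ w).mpr hw))
      obtain ⟨hA, hB, hC⟩ := ihf.2 (nbrS d u) (PySem.Set.add vis u) (PySem.Set.add cl u) T hks huv' hcl'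
      refine ⟨?_, hB, ?_⟩
      · exact (dfs_mono S f).2 _ _ _ u ((hvadd u).mpr (Or.inr rfl))
      · intro x hx
        rcases hC x hx with h | h
        · rcases (hvadd x).mp h with h' | h'
          · exact Or.inl h'
          · exact Or.inr (h' ▸ hu)
        · exact Or.inr h
    refine ⟨hd, ?_⟩
    intro ws
    induction ws with
    | nil =>
      intro vis cl T _ _ hcl
      refine ⟨by simp, ?_, fun x hx => Or.inl (by simpa [dfsLoopA] using hx)⟩
      intro x hx w hw
      have := hcl x (by simpa [dfsLoopA] using hx) w hw
      simpa [dfsLoopA] using this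
    | cons w ws ih =>
      intro vis cl T hk huv hcl
      by_cases hc : w ∈ vis
      · have hcb : PySem.Set.contains vis w = true := (PySem.Set.contains_iff vis w).mpr hc
        simp only [dfsLoopA, hcb, if_true]
        have hcl' : ClosedE d vis (ws ++ T) := by
          intro x hx w' hw'
          rcases hcl x hx w' hw' with h | h
          · exact Or.inl h
          · have h3 : w' = w ∨ w' ∈ ws ∨ w' ∈ T := by simpa using h
            rcases h3 with h' | h' | h'
            · exact Or.inl (h' ▸ hc)
            · exact Or.inr (List.mem_append_left _ h')
            · exact Or.inr (List.mem_append_right _ h')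
        obtain ⟨hA, hB, hC⟩ := ih vis cl T (fun x hx => hk x (List.mem_cons_of_mem _ hx)) huv hcl'
        refine ⟨?_, hB, hC⟩
        intro w' hw'
        rcases List.mem_cons.mp hw' with h' | h'
        · subst h'
          exact (dfs_mono S (f+1)).2 ws vis cl w' hc
        · exact hA w' h'
      · have hcb : PySem.Set.contains vis w = false := by
          rw [← Bool.not_eq_true, PySem.Set.contains_iff]; exact hc
        simp only [dfsLoopA, hcb, Bool.false_eq_true, if_false]
        have hclw : ClosedE d vis (w :: (ws ++ T)) := by
          intro x hx w' hw'
          rcases hcl x hx w' hw' with h | h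
          · exact Or.inl h
          · exact Or.inr (by simpa using h)
        obtain ⟨d1, d2, d3⟩ := hd w vis cl (ws ++ T) (hk w (by simp)) hc huv hclw
        have hmono1 : ∀ x ∈ vis, x ∈ (dfsA S (f+1) w vis cl).1 :=
          fun x hx => (dfs_mono S (f+1)).1 w vis cl x hx
        have huv2 : UV d (dfsA S (f+1) w vis cl).1 ≤ f + 1 :=
          le_trans (UV_mono d vis _ hmono1) huv
        obtain ⟨hA, hB, hC⟩ := ih (dfsA S (f+1) w vis cl).1 (dfsA S (f+1) w vis cl).2 T
          (fun x hx => hk x (List.mem_cons_of_mem _ hx)) huv2 d2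
        refine ⟨?_, hB, ?_⟩
        · intro w' hw'
          rcases List.mem_cons.mp hw' with h' | h'
          · subst h'
            exact (dfs_mono S (f+1)).2 ws _ _ w' d1
          · exact hA w' h'
        · intro x hx
          rcases hC x hx with h | h
          · rcases d3 x h with h' | h'
            · exact Or.inl h'
            · exact Or.inr h'
          · exact Or.inr h

-- ========== B's explicit stack run equals A's recursive dfs loop ==========

theorem dfsLoopA_append (S : PySem.Dict Int (PySem.Set Int)) (f : Nat) :
    ∀ (xs ys : List Int) (vis cl : PySem.Set Int),
      dfsLoopA S f (xs ++ ys) vis cl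
        = dfsLoopA S f ys (dfsLoopA S f xs vis cl).1 (dfsLoopA S f xs vis cl).2 := by
  intro xs
  induction xs with
  | nil => intro ys vis cl; simp [dfsLoopA]
  | cons x xs ih =>
    intro ys vis cl
    simp only [List.cons_append, dfsLoopA]
    by_cases hc : PySem.Set.contains vis x
    · simp only [hc, if_true]; exact ih ys vis cl
    · simp only [hc, Bool.false_eq_true, if_false]; exact ih ys _ _

-- the central bridge: with sufficient fuel on both sides, B's stack loop computes
-- exactly what A's recursive neighbour loop computes, for ANY pair of fuels.
theorem stack_eq_loop (d : PySem.Dict Int (List Int)) (hnd : d.keys.Nodup)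
    (S M : PySem.Dict Int (PySem.Set Int))
    (hS : ∀ x, S.getD x PySem.Set.empty = nbrS d x)
    (hM : ∀ x, M.getD x PySem.Set.empty = nbrS d x) :
    ∀ (fs : Nat) (ws : List Int) (vis cl : PySem.Set Int) (F : Nat),
      (∀ w ∈ ws, w ∈ d.keys) → UV d vis ≤ fs → UV d vis ≤ F →
      stackRun M fs ws vis cl = dfsLoopA S F ws vis cl := by
  intro fs
  induction fs with
  | zero =>
    intro ws
    induction ws with
    | nil => intro vis cl F _ _ _; simp [stackRun, dfsLoopA]
    | cons w ws ih =>
      intro vis cl F hk huv huvF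
      by_cases hc : w ∈ vis
      · have hcb : PySem.Set.contains vis w = true := (PySem.Set.contains_iff vis w).mpr hc
        simp only [stackRun, dfsLoopA, hcb, if_true]
        exact ih vis cl F (fun x hx => hk x (List.mem_cons_of_mem _ hx)) huv huvF
      · exact absurd huv (by
          have := UV_pos d vis w (hk w (by simp)) hc
          omega)
  | succ f ihf =>
    intro ws
    induction ws with
    | nil => intro vis cl F _ _ _; simp [stackRun, dfsLoopA]
    | cons w ws ih =>
      intro vis cl F hk huv huvF
      by_cases hc : w ∈ vis
      · have hcb : PySem.Set.contains vis w = true := (PySem.Set.contains_iff vis w).mpr hc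
        simp only [stackRun, dfsLoopA, hcb, if_true]
        exact ih vis cl F (fun x hx => hk x (List.mem_cons_of_mem _ hx)) huv huvF
      · have hcb : PySem.Set.contains vis w = false := by
          rw [← Bool.not_eq_true, PySem.Set.contains_iff]; exact hc
        have hwk : w ∈ d.keys := hk w (by simp)
        have huv1 : 0 < UV d vis := UV_pos d vis w hwk hc
        obtain ⟨F', rfl⟩ : ∃ F', F = F' + 1 := ⟨F - 1, by omega⟩
        have hadd := UV_add d hnd vis w hwk hc
        have huv' : UV d (vis.add w) ≤ f := by omega
        have huvF' : UV d (vis.add w) ≤ F' := by omega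
        have hsub : ∀ x ∈ ((M.getD w PySem.Set.empty : List Int) ++ ws), x ∈ d.keys := by
          intro x hx
          rcases List.mem_append.mp hx with h | h
          · rw [hM w] at h
            exact nbrL_mem_keys d w x ((PySem.Set.mem_ofList _ _).mp h)
          · exact hk x (List.mem_cons_of_mem _ h)
        -- unfold one step on each side
        simp only [stackRun, dfsLoopA, hcb, Bool.false_eq_true, if_false]
        -- LHS = A's loop (fuel F') on adj(w) ++ ws, from the marked state
        rw [ihf ((M.getD w PySem.Set.empty : List Int) ++ ws) (vis.add w) (cl.add w) F'
          hsub huv' huvF']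
        rw [dfsLoopA_append]
        -- the run over adj(w) at fuel F' IS dfsA (F'+1) w vis cl
        have hAdef : dfsLoopA S F' (M.getD w PySem.Set.empty : List Int) (vis.add w) (cl.add w)
            = dfsA S (F'+1) w vis cl := by
          simp only [dfsA]
          rw [hM w, hS w]
        rw [hAdef]
        -- both tails equal the stack run at fuel f (IH twice), hence each other
        set r := dfsA S (F'+1) w vis cl with hr
        have hrmono : ∀ x ∈ vis.add w, x ∈ r.1 := by
          intro x hx
          rw [hr]
          simp only [dfsA]
          exact (dfs_mono S F').2 _ _ _ x hx
        have huvr : UV d r.1 ≤ UV d (vis.add w) := UV_mono d _ _ hrmono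
        have hws : ∀ x ∈ ws, x ∈ d.keys := fun x hx => hk x (List.mem_cons_of_mem _ hx)
        have h1 := ihf ws r.1 r.2 F' hws (by omega) (by omega)
        have h2 := ihf ws r.1 r.2 (F'+1) hws (by omega) (by omega)
        rw [← h1, h2]

-- one full stack run from a single start node equals A's dfs call
theorem stack_start (d : PySem.Dict Int (List Int)) (hnd : d.keys.Nodup)
    (S M : PySem.Dict Int (PySem.Set Int))
    (hS : ∀ x, S.getD x PySem.Set.empty = nbrS d x)
    (hM : ∀ x, M.getD x PySem.Set.empty = nbrS d x)
    (u : Int) (vis cl : PySem.Set Int) (hv : u ∉ vis) :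
    stackRun M (d.keys.length + 1) [u] vis cl = dfsA S (d.keys.length + 1) u vis cl := by
  have hcb : PySem.Set.contains vis u = false := by
    rw [← Bool.not_eq_true, PySem.Set.contains_iff]; exact hv
  simp only [stackRun, dfsA, hcb, Bool.false_eq_true, if_false, List.append_nil]
  rw [stack_eq_loop d hnd S M hS hM (d.keys.length) (M.getD u PySem.Set.empty : List Int)
    (vis.add u) (cl.add u) (d.keys.length)
    (by
      intro x hx
      rw [hM u] at hx
      exact nbrL_mem_keys d u x ((PySem.Set.mem_ofList _ _).mp hx))
    (UV_le_len d _) (UV_le_len d _)]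
  rw [hM u, hS u]

-- ========== the outer fold over candidate start nodes ==========

def OStep (S : PySem.Dict Int (PySem.Set Int)) (F : Nat)
    (acc : PySem.Set Int × List (List Int)) (u : Int) : PySem.Set Int × List (List Int) :=
  if PySem.Set.contains acc.1 u then acc
  else
    let r := dfsA S F u acc.1 PySem.Set.empty
    (r.1, acc.2 ++ [r.2])

def Closed (d : PySem.Dict Int (List Int)) (vis : PySem.Set Int) : Prop :=
  ClosedE d vis []

theorem dfs_self (S : PySem.Dict Int (PySem.Set Int)) (f : Nat) (u : Int)
    (vis cl : PySem.Set Int) (hf : 1 ≤ f) : u ∈ (dfsA S f u vis cl).1 := by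
  obtain ⟨f', rfl⟩ : ∃ f', f = f' + 1 := ⟨f - 1, by omega⟩
  simp only [dfsA]
  exact (dfs_mono S f').2 _ _ _ u (by rw [PySem.Set.mem_add]; exact Or.inr rfl)

theorem ostep_skip (S : PySem.Dict Int (PySem.Set Int)) (F : Nat)
    (acc : PySem.Set Int × List (List Int)) (u : Int) (h : u ∈ acc.1) :
    OStep S F acc u = acc := by
  unfold OStep
  rw [if_pos ((PySem.Set.contains_iff acc.1 u).mpr h)]

theorem ostep_mono (S : PySem.Dict Int (PySem.Set Int)) (F : Nat)
    (acc : PySem.Set Int × List (List Int)) (u : Int) (x : Int) (hx : x ∈ acc.1) :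
    x ∈ (OStep S F acc u).1 := by
  unfold OStep
  by_cases h : PySem.Set.contains acc.1 u
  · rw [if_pos h]; exact hx
  · rw [if_neg h]; exact (dfs_mono S F).1 _ _ _ x hx

theorem ostep_self (S : PySem.Dict Int (PySem.Set Int)) (F : Nat) (hF : 1 ≤ F)
    (acc : PySem.Set Int × List (List Int)) (u : Int) :
    u ∈ (OStep S F acc u).1 := by
  unfold OStep
  by_cases h : PySem.Set.contains acc.1 u
  · rw [if_pos h]; exact (PySem.Set.contains_iff acc.1 u).mp h
  · rw [if_neg h]; exact dfs_self S F u acc.1 PySem.Set.empty hF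

theorem foldC_mono (S : PySem.Dict Int (PySem.Set Int)) (F : Nat) :
    ∀ (L : List Int) (acc : PySem.Set Int × List (List Int)) (x : Int),
      x ∈ acc.1 → x ∈ (L.foldl (OStep S F) acc).1 := by
  intro L
  induction L with
  | nil => intro acc x hx; exact hx
  | cons u L ih => intro acc x hx; exact ih _ x (ostep_mono S F acc u x hx)

theorem foldC_mem (S : PySem.Dict Int (PySem.Set Int)) (F : Nat) (hF : 1 ≤ F) :
    ∀ (L : List Int) (acc : PySem.Set Int × List (List Int)) (u : Int),
      u ∈ L → u ∈ (L.foldl (OStep S F) acc).1 := by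
  intro L
  induction L with
  | nil => intro acc u hu; simp at hu
  | cons v L ih =>
    intro acc u hu
    rcases List.mem_cons.mp hu with h | h
    · subst h; exact foldC_mono S F L _ u (ostep_self S F hF acc u)
    · exact ih _ u h

theorem foldC_skipall (S : PySem.Dict Int (PySem.Set Int)) (F : Nat) :
    ∀ (ws : List Int) (acc : PySem.Set Int × List (List Int)),
      (∀ w ∈ ws, w ∈ acc.1) → ws.foldl (OStep S F) acc = acc := by
  intro ws
  induction ws with
  | nil => intro acc _; rfl
  | cons w ws ih =>
    intro acc h
    simp only [List.foldl_cons]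
    rw [ostep_skip S F acc w (h w (by simp))]
    exact ih acc (fun w' hw' => h w' (List.mem_cons_of_mem _ hw'))

theorem foldC_dedup (S : PySem.Dict Int (PySem.Set Int)) (F : Nat) (hF : 1 ≤ F) :
    ∀ (X : List Int) (acc : PySem.Set Int × List (List Int)),
      (PySem.Set.ofList X).foldl (OStep S F) acc = X.foldl (OStep S F) acc := by
  intro X
  induction X using List.reverseRecOn with
  | nil => intro acc; rfl
  | append_singleton X x ih =>
    intro acc
    rw [PySem.Set.ofList_append_singleton, PySem.Set.add_eq_ite, List.foldl_append]
    by_cases hx : x ∈ PySem.Set.ofList X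
    · rw [if_pos hx, ih]
      have hxX : x ∈ X := (PySem.Set.mem_ofList X x).mp hx
      simp only [List.foldl_cons, List.foldl_nil]
      rw [ostep_skip S F _ x (foldC_mem S F hF X acc x hxX)]
    · rw [if_neg hx, List.foldl_append, ih]

theorem ostep_closed (d : PySem.Dict Int (List Int)) (hnd : d.keys.Nodup)
    (S : PySem.Dict Int (PySem.Set Int)) (hS : ∀ x, S.getD x PySem.Set.empty = nbrS d x)
    (F : Nat) (hF : 1 ≤ F) (hF2 : d.keys.length ≤ F)
    (acc : PySem.Set Int × List (List Int)) (u : Int) (hcl : Closed d acc.1) :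
    Closed d (OStep S F acc u).1 ∧ (∀ w ∈ nbrL d u, w ∈ (OStep S F acc u).1) := by
  by_cases h : u ∈ acc.1
  · rw [ostep_skip S F acc u h]
    refine ⟨hcl, ?_⟩
    intro w hw
    rcases hcl u h w hw with h' | h'
    · exact h'
    · simp at h'
  · have hcb : PySem.Set.contains acc.1 u = false := by
      rw [← Bool.not_eq_true, PySem.Set.contains_iff]; exact h
    unfold OStep
    rw [if_neg (by simp; exact h)]
    by_cases hk : u ∈ d.keys
    · have huv : UV d acc.1 ≤ F := le_trans List.countP_le_length hF2
      have hclT : ClosedE d acc.1 (u :: []) := by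
        intro x hx w hw
        rcases hcl x hx w hw with h' | h'
        · exact Or.inl h'
        · simp at h'
      obtain ⟨c1, c2, _⟩ := (dfs_cl d hnd S hS F).1 u acc.1 PySem.Set.empty [] hk h huv hclT
      refine ⟨c2, ?_⟩
      intro w hw
      rcases c2 u c1 w hw with h' | h'
      · exact h'
      · simp at h'
    · have hnil : nbrL d u = [] := by
        unfold nbrL
        rw [getD_eq_nil_of_not_mem_keys d u hk]
        rfl
      obtain ⟨f', rfl⟩ : ∃ f', F = f' + 1 := ⟨F - 1, by omega⟩
      simp only [dfsA, hS u]
      unfold nbrS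
      rw [hnil]
      have hofl : (PySem.Set.ofList ([] : List Int)) = ([] : List Int) := rfl
      rw [hofl]
      simp only [dfsLoopA]
      constructor
      · intro x hx w hw
        rcases (PySem.Set.mem_add acc.1 u x).mp hx with h' | h'
        · rcases hcl x h' w hw with h'' | h''
          · exact Or.inl ((PySem.Set.mem_add acc.1 u w).mpr (Or.inl h''))
          · simp at h''
        · subst h'
          rw [hnil] at hw
          simp at hw
      · intro w hw
        simp at hw

theorem foldC_blocks (d : PySem.Dict Int (List Int)) (hnd : d.keys.Nodup)
    (S : PySem.Dict Int (PySem.Set Int)) (hS : ∀ x, S.getD x PySem.Set.empty = nbrS d x)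
    (F : Nat) (hF : 1 ≤ F) (hF2 : d.keys.length ≤ F) :
    ∀ (l : List Int) (acc : PySem.Set Int × List (List Int)), Closed d acc.1 →
      ((l.map (fun w => w :: nbrL d w)).flatten).foldl (OStep S F) acc
        = l.foldl (OStep S F) acc := by
  intro l
  induction l with
  | nil => intro acc _; rfl
  | cons u l ih =>
    intro acc hcl
    simp only [List.map_cons, List.flatten_cons, List.foldl_cons]
    rw [List.cons_append, List.foldl_cons, List.foldl_append]
    obtain ⟨hc1, hc2⟩ := ostep_closed d hnd S hS F hF hF2 acc u hcl
    rw [foldC_skipall S F (nbrL d u) _ hc2]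
    exact ih _ hc1

-- ========== characterizations of the built dictionaries ==========

theorem items_fst (d : PySem.Dict Int (List Int)) : d.items.map Prod.fst = d.keys := by
  simp [PySem.Dict.keys]

theorem dict_size_keys {ν : Type} (d : PySem.Dict Int ν) : d.size = d.keys.length := by
  simp [PySem.Dict.size, PySem.Dict.keys]

theorem strictOf_inv (d : PySem.Dict Int (List Int)) (hnd : d.keys.Nodup) :
    PInv d d.keys (strictOf d) := by
  have h := phase1_inv d d.items [] PySem.Dict.empty
    (fun p hp => by
      obtain ⟨a, b⟩ := p
      exact PySem.Dict.getD_of_mem_items d hp hnd [])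
    (fun p _ => by simp)
    (by rw [items_fst]; exact hnd)
    (by
      constructor
      · rw [PySem.Dict.keys_empty]; rfl
      · intro v
        rw [PySem.Dict.getD_empty]
        unfold oldVal
        rw [if_neg (by simp)]
        rfl)
  rw [List.nil_append, items_fst] at h
  exact h

theorem strictOf_getD (d : PySem.Dict Int (List Int)) (hnd : d.keys.Nodup) (v : Int) :
    (strictOf d).getD v PySem.Set.empty = nbrS d v := by
  rw [(strictOf_inv d hnd).2 v]
  unfold oldVal
  by_cases hv : v ∈ d.keys
  · rw [if_pos hv]
  · rw [if_neg hv]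
    have h1 : d.keys.filter (fun w => decide (v ∈ nbrL d w)) = [] := by
      rw [List.filter_eq_nil_iff]
      intro w _ hmem
      simp only [decide_eq_true_eq] at hmem
      have h2 := (nbrL_symm d w v).mp hmem
      have h3 := nbrL_sub_getD d v w h2
      rw [getD_eq_nil_of_not_mem_keys d v hv] at h3
      simp at h3
    rw [h1]
    unfold nbrS nbrL
    rw [getD_eq_nil_of_not_mem_keys d v hv]
    rfl

theorem mem_blocksK (d : PySem.Dict Int (List Int)) (x : Int) :
    x ∈ blocksK d d.keys ↔ x ∈ d.keys := by
  unfold blocksK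
  rw [List.mem_flatten]
  constructor
  · rintro ⟨b, hb, hxb⟩
    rcases List.mem_map.mp hb with ⟨w, hw, rfl⟩
    rcases List.mem_cons.mp hxb with h | h
    · exact h ▸ hw
    · exact nbrL_mem_keys d w x h
  · intro hx
    exact ⟨x :: nbrL d x, List.mem_map.mpr ⟨x, hx, rfl⟩, by simp⟩

theorem strictOf_size (d : PySem.Dict Int (List Int)) (hnd : d.keys.Nodup) :
    (strictOf d).size = d.keys.length := by
  rw [dict_size_keys, (strictOf_inv d hnd).1]
  have hperm : (PySem.Set.ofList (blocksK d d.keys)).Perm d.keys := by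
    rw [List.perm_ext_iff_of_nodup (PySem.Set.nodup_ofList _) hnd]
    intro a
    rw [PySem.Set.mem_ofList]
    exact mem_blocksK d a
  exact hperm.length_eq

theorem mutOf_keys (d : PySem.Dict Int (List Int)) (hnd : d.keys.Nodup) :
    (mutOf d).keys = d.keys := by
  unfold mutOf
  rw [PySem.Dict.keys_foldl_insert_key d.items Prod.fst
    (fun m p => PySem.Set.ofList (p.2.filter (fun v =>
      PySem.Set.contains ((nsetsOf d).getD v PySem.Set.empty) p.1))) PySem.Dict.empty]
  rw [PySem.Dict.keys_empty, PySem.Set.update_nil_left, items_fst,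
    PySem.Set.ofList_eq_self_of_nodup _ hnd]

theorem mutOf_size (d : PySem.Dict Int (List Int)) (hnd : d.keys.Nodup) :
    (mutOf d).size = d.keys.length := by
  rw [dict_size_keys, mutOf_keys d hnd]

-- ========== the B-side outer fold equals the A-side one ==========

theorem foldB_eq (d : PySem.Dict Int (List Int)) (hnd : d.keys.Nodup)
    (S M : PySem.Dict Int (PySem.Set Int))
    (hS : ∀ x, S.getD x PySem.Set.empty = nbrS d x)
    (hM : ∀ x, M.getD x PySem.Set.empty = nbrS d x) :
    ∀ (L : List Int) (acc : PySem.Set Int × List (List Int)),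
      L.foldl (fun (acc : PySem.Set Int × List (List Int)) u =>
        if PySem.Set.contains acc.1 u then acc
        else
          let r := stackRun M (d.keys.length + 1) [u] acc.1 PySem.Set.empty
          (r.1, acc.2 ++ [r.2])) acc
      = L.foldl (OStep S (d.keys.length + 1)) acc := by
  intro L
  induction L with
  | nil => intro acc; rfl
  | cons u L ih =>
    intro acc
    simp only [List.foldl_cons]
    rw [ih]
    congr 1
    unfold OStep
    by_cases hc : PySem.Set.contains acc.1 u
    · rw [if_pos hc, if_pos hc]
    · rw [if_neg hc, if_neg hc]
      have hv : u ∉ acc.1 := fun h => hc ((PySem.Set.contains_iff acc.1 u).mpr h)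
      rw [stack_start d hnd S M hS hM u acc.1 PySem.Set.empty hv]

-- ========== the equivalence ==========

theorem main_equiv (al : List (Int × List Int)) :
    build_strict_mutual_network al = build_strict_mutual_network_alt al := by
  have hnd : (PySem.Dict.ofList al).keys.Nodup := PySem.Dict.nodup_keys_ofList al
  set d := PySem.Dict.ofList al with hd
  have hA : build_strict_mutual_network al
      = (((strictOf d).keys).foldl (OStep (strictOf d) ((strictOf d).size + 1))
          (PySem.Set.empty, [])).2 := rfl
  have hB : build_strict_mutual_network_alt al
      = ((d.keys).foldl (fun (acc : PySem.Set Int × List (List Int)) u =>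
          if PySem.Set.contains acc.1 u then acc
          else
            let r := stackRun (mutOf d) ((mutOf d).size + 1) [u] acc.1 PySem.Set.empty
            (r.1, acc.2 ++ [r.2])) (PySem.Set.empty, [])).2 := rfl
  have hScl : ∀ x, (strictOf d).getD x PySem.Set.empty = nbrS d x := strictOf_getD d hnd
  have hMcl : ∀ x, (mutOf d).getD x PySem.Set.empty = nbrS d x := mutOf_getD d hnd
  rw [hA, hB, mutOf_size d hnd, strictOf_size d hnd,
    foldB_eq d hnd (strictOf d) (mutOf d) hScl hMcl d.keys]
  have hF1 : 1 ≤ d.keys.length + 1 := by omega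
  have hF2 : d.keys.length ≤ d.keys.length + 1 := by omega
  have hcl0 : Closed d (PySem.Set.empty, ([] : List (List Int))).1 := by
    intro x hx
    simp [PySem.Set.empty] at hx
  rw [(strictOf_inv d hnd).1]
  rw [foldC_dedup (strictOf d) _ hF1]
  have hblocks := foldC_blocks d hnd (strictOf d) hScl (d.keys.length + 1) hF1 hF2
    d.keys (PySem.Set.empty, []) hcl0
  unfold blocksK
  rw [hblocks]

-- ===== VERDICT (by name: the statement is the Claim_ definition above) =====
theorem build_strict_mutual_network_spec : Claim_equal_build_strict_mutual_network := by
  intro adjacency_list _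
  exact main_equiv adjacency_list
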